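-- pv_equiv track=rewrite | github.com/Mariyatm/adequate | adequate.py | is_isomorhic
-- ===== SOURCE A (Python) =====
-- import itertools
--
-- def  is_identical(graph1, graph2, p):
--     n = len(graph1)
--     for i in range(n):
--         for j in range(i+1, n):
--             if graph1[i][j] != graph2[p[i]][p[j]]:
--                 return False
--     return True
--
-- def trace(graph):
--     n = len(graph)
--     tr = 0
--     for i in range(n):
--         tr += graph[i][i]
--     return tr
--
-- def is_isomorhic(graph1, graph2, k): # the graphs should have k degrees degree1 and n-k degrees degree2
--     n = len(graph1)
--     if trace(graph1) != trace(graph2):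
--         return False
--
--     permutations_1 = itertools.permutations([i for i in range(k)])
--     permutations_2 = itertools.permutations([i for i in range(k,n)])
--
--     perm2 =[]
--     for p2 in permutations_2:
--         perm2.append(p2)
--     for p1 in permutations_1:
--         for p2 in perm2:
--             p = list(p1) + list(p2)
--             if  is_identical(graph1, graph2, p):
--                 return True
--     return False
-- ===== SOURCE B (Python) =====
-- def is_isomorhic(graph1, graph2, k):  # backtracking over partial block-respecting mappings instead of enumerating all permutation pairs
--     n = len(graph1)
--     if sum(row[i] for i, row in enumerate(graph1)) != sum(row[i] for i, row in enumerate(graph2)):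
--         return False
--
--     def extend(p):
--         i = len(p)
--         if i == n:
--             return True
--         lo, hi = (0, k) if i < k else (k, n)
--         for t in range(lo, hi):
--             if t not in p and all(graph1[j][i] == graph2[p[j]][t] for j in range(i)) and extend(p + [t]):
--                 return True
--         return False
--
--     return extend([])
-- ===== Notes on version B (the rewrite author's own statement) =====
-- stated objective: alternative
-- what changed: A enumerates every pair of block permutations (all k!*(n-k)! of them) and tests each complete mapping; B runs a recursive backtracking search that extends a partial mapping vertex by vertex, pruning as soon as one already-placed off-diagonal pair disagrees.
-- outside the precondition, e.g. on is_isomorhic([[0]], [[0]], 2): A returns True, B returns True; on is_isomorhic([[0, 1]], [[0]], 1): A returns True, B returns True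
import Mathlib
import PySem

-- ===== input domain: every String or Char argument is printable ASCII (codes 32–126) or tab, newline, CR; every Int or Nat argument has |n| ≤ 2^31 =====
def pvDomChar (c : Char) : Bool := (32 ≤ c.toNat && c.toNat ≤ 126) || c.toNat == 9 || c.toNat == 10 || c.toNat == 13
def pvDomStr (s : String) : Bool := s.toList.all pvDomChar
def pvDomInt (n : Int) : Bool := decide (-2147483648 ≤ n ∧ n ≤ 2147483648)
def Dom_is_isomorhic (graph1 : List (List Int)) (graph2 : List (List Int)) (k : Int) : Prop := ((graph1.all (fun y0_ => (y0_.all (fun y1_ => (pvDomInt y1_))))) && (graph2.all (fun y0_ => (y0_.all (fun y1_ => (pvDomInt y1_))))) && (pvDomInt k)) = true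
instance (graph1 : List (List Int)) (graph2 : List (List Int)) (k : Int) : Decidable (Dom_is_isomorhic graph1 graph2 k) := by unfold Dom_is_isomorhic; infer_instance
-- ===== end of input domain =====

-- B replaces A's enumeration of all |perm(0..k-1)|·|perm(k..n-1)| permutation pairs by a
-- recursive backtracking search that extends a partial mapping vertex by vertex, pruning a
-- partial image as soon as one already-placed off-diagonal pair mismatches (same return value).

-- ===== PORT A =====
def pvTrace (g : List (List Int)) : Int :=
  (PySem.List.pyRange 0 (g.length : Int) 1).foldl
    (fun tr i => tr + PySem.List.pyGetD (PySem.List.pyGetD g i []) i 0) 0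

def pvIsIdentical (g1 g2 : List (List Int)) (p : List Int) : Bool :=
  (PySem.List.pyRange 0 (g1.length : Int) 1).all fun i =>
    (PySem.List.pyRange (i + 1) (g1.length : Int) 1).all fun j =>
      PySem.List.pyGetD (PySem.List.pyGetD g1 i []) j 0 ==
        PySem.List.pyGetD (PySem.List.pyGetD g2 (PySem.List.pyGetD p i 0) []) (PySem.List.pyGetD p j 0) 0

def is_isomorhic (graph1 : List (List Int)) (graph2 : List (List Int)) (k : Int) : Bool :=
  let n : Int := graph1.length
  if pvTrace graph1 != pvTrace graph2 then false
  else
    let r1 := PySem.List.pyRange 0 k 1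
    let r2 := PySem.List.pyRange k n 1
    (PySem.List.permutations r1 r1.length).any fun p1 =>
      (PySem.List.permutations r2 r2.length).any fun p2 =>
        pvIsIdentical graph1 graph2 (p1 ++ p2)

-- ===== PORT B =====
def pvTraceB (g : List (List Int)) : Int :=
  ((PySem.List.enumerate g 0).map (fun ir => PySem.List.pyGetD ir.2 ir.1 0)).sum

def pvExtend (g1 g2 : List (List Int)) (n k : Int) : Nat → List Int → Bool
  | fuel, p =>
    if (p.length : Int) == n then true
    else
      match fuel with
      | 0 => false
      | fuel + 1 =>
        let i : Int := p.length
        let lo := if i < k then (0 : Int) else k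
        let hi := if i < k then k else n
        (PySem.List.pyRange lo hi 1).any fun t =>
          !p.contains t &&
          ((PySem.List.pyRange 0 i 1).all fun j =>
              PySem.List.pyGetD (PySem.List.pyGetD g1 j []) i 0 ==
                PySem.List.pyGetD (PySem.List.pyGetD g2 (PySem.List.pyGetD p j 0) []) t 0) &&
          pvExtend g1 g2 n k fuel (p ++ [t])

def is_isomorhic_alt (graph1 : List (List Int)) (graph2 : List (List Int)) (k : Int) : Bool :=
  if pvTraceB graph1 != pvTraceB graph2 then false
  else pvExtend graph1 graph2 (graph1.length : Int) k graph1.length []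

-- ===== PRECONDITION & SPEC =====
-- the sum of the readable diagonal of a matrix (used only to state Pre_)
def pvDiagSum (g : List (List Int)) : Int :=
  ((List.range g.length).map (fun i => (g.getD i []).getD i 0)).sum

-- Pre_ admits every input whose fully-present diagonals have different sums (both programs stop
-- at False there) and otherwise restricts to the natural domain — square matrices of equal size
-- with 0 ≤ k ≤ n; outside it A's chained indexing generally raises IndexError, except on
-- degenerate shapes where the permutation search happens to return without reading a missing entry.
def Pre_is_isomorhic (graph1 : List (List Int)) (graph2 : List (List Int)) (k : Int) : Prop :=
  ((∀ i < graph1.length, i < (graph1.getD i []).length) ∧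
   (∀ i < graph2.length, i < (graph2.getD i []).length) ∧
   pvDiagSum graph1 ≠ pvDiagSum graph2) ∨
  (graph2.length = graph1.length ∧
   (∀ r ∈ graph1, r.length = graph1.length) ∧
   (∀ r ∈ graph2, r.length = graph1.length) ∧
   0 ≤ k ∧ k ≤ (graph1.length : Int))
instance (graph1 : List (List Int)) (graph2 : List (List Int)) (k : Int) : Decidable (Pre_is_isomorhic graph1 graph2 k) := by unfold Pre_is_isomorhic; infer_instance

def pvWitness_is_isomorhic : List (List Int) × List (List Int) × Int :=
  ([[1, 2], [3, 0]], [[0, 3], [2, 1]], 1)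

def Spec_is_isomorhic (graph1 : List (List Int)) (graph2 : List (List Int)) (k : Int) (out : Bool) : Prop := out = is_isomorhic_alt graph1 graph2 k
instance (graph1 : List (List Int)) (graph2 : List (List Int)) (k : Int) (out : Bool) : Decidable (Spec_is_isomorhic graph1 graph2 k out) := by unfold Spec_is_isomorhic; infer_instance

-- ===== CLAIM (what is proved, stated in full; the proofs are below) =====
def Claim_equal_is_isomorhic : Prop := ∀ (graph1 : List (List Int)) (graph2 : List (List Int)) (k : Int), Dom_is_isomorhic graph1 graph2 k → Pre_is_isomorhic graph1 graph2 k → Spec_is_isomorhic graph1 graph2 k (is_isomorhic graph1 graph2 k)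

-- ===== LEMMAS AND PROOFS =====

-- entry of a matrix at Int indices, as both ports read it
def pvEI (g : List (List Int)) (a b : Int) : Int :=
  PySem.List.pyGetD (PySem.List.pyGetD g a []) b 0

-- p maps position a into its block ([0,k) below position k, [k,n) above)
def pvBlk (k n : Int) (p : List Int) : Prop :=
  ∀ a : Nat, a < p.length →
    (if (a : Int) < k then 0 ≤ p.getD a 0 ∧ p.getD a 0 < k
     else k ≤ p.getD a 0 ∧ p.getD a 0 < n)

-- all strict-upper-triangle pairs already inside p agree between the two graphs
def pvPC (g1 g2 : List (List Int)) (p : List Int) : Prop :=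
  ∀ a b : Nat, a < b → b < p.length →
    pvEI g1 a b = pvEI g2 (p.getD a 0) (p.getD b 0)

-- a complete consistent block-respecting injective mapping
def pvGood (g1 g2 : List (List Int)) (k : Int) (p : List Int) : Prop :=
  p.length = g1.length ∧ p.Nodup ∧ pvBlk k g1.length p ∧ pvPC g1 g2 p

theorem pvTraceB_eq_pvDiagSum (g : List (List Int)) : pvTraceB g = pvDiagSum g := by
  unfold pvTraceB pvDiagSum
  rw [PySem.List.enumerate_eq_map_pyRange g [], PySem.List.len_eq, PySem.List.pyRange_zero_natCast]
  simp [List.map_map, Function.comp_def, PySem.List.pyGetD_natCast]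

theorem pvTrace_eq_pvTraceB (g : List (List Int)) : pvTrace g = pvTraceB g := by
  unfold pvTrace pvTraceB
  rw [PySem.List.foldl_add, PySem.List.enumerate_eq_map_pyRange g []]
  simp [List.map_map, PySem.List.len, Function.comp_def]

theorem pvIsIdentical_iff_pvPC (g1 g2 : List (List Int)) (p : List Int)
    (hp : p.length = g1.length) :
    pvIsIdentical g1 g2 p = true ↔ pvPC g1 g2 p := by
  unfold pvIsIdentical pvPC
  simp only [List.all_eq_true, PySem.List.mem_pyRange_one, beq_iff_eq]
  constructor
  · intro h a b hab hb
    have h2 := h (a : Int) ⟨by positivity, by exact_mod_cast (by omega : a < g1.length)⟩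
      (b : Int) ⟨by exact_mod_cast (by omega : a + 1 ≤ b), by exact_mod_cast (by omega : b < g1.length)⟩
    simpa [pvEI, PySem.List.pyGetD_natCast] using h2
  · intro h i ⟨hi0, hin⟩ j ⟨hij, hjn⟩
    obtain ⟨a, rfl⟩ : ∃ a : Nat, i = (a : Int) := ⟨i.toNat, by omega⟩
    obtain ⟨b, rfl⟩ : ∃ b : Nat, j = (b : Int) := ⟨j.toNat, by omega⟩
    have := h a b (by omega) (by omega)
    simpa [pvEI, PySem.List.pyGetD_natCast] using this

theorem mem_permutations_of_perm (p : List Int) : ∀ (xs : List Int), p.Perm xs →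
    p ∈ PySem.List.permutations xs xs.length := by
  induction p with
  | nil => intro xs h; rw [List.nil_perm] at h; subst h; simp [PySem.List.permutations_zero]
  | cons a p ih =>
    intro xs h
    have ha : a ∈ xs := h.mem_iff.mp (by simp)
    have hlen : xs.length = p.length + 1 := by simpa using h.length_eq.symm
    have hp : p.Perm (xs.erase a) := (h.trans (List.perm_cons_erase ha)).cons_inv
    rw [hlen, PySem.List.permutations.eq_2]
    rw [List.mem_flatMap]
    refine ⟨xs.idxOf a, by simp [List.idxOf_lt_length_iff, ha], ?_⟩
    have hget : xs[xs.idxOf a]? = some a := by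
      rw [List.getElem?_eq_getElem (by simp [List.idxOf_lt_length_iff, ha])]
      simp [List.getElem_idxOf]
    rw [hget]
    simp only [List.mem_map]
    refine ⟨p, ?_, rfl⟩
    rw [List.eraseIdx_idxOf_eq_erase]
    have : p.length = (xs.erase a).length := by
      rw [List.length_erase_of_mem ha]; omega
    rw [this]
    exact ih (xs.erase a) hp

-- prefix closure
theorem pvPC_append_left (g1 g2 : List (List Int)) (p s : List Int)
    (h : pvPC g1 g2 (p ++ s)) : pvPC g1 g2 p := by
  intro a b hab hb
  have := h a b hab (by simp; omega)
  rwa [List.getD_append _ _ _ _ (by omega), List.getD_append _ _ _ _ hb] at this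

theorem pvBlk_append_left (k n : Int) (p s : List Int)
    (h : pvBlk k n (p ++ s)) : pvBlk k n p := by
  intro a ha
  have := h a (by simp; omega)
  rwa [List.getD_append _ _ _ _ ha] at this

theorem pvPC_snoc (g1 g2 : List (List Int)) (p : List Int) (t : Int) :
    pvPC g1 g2 (p ++ [t]) ↔
      (pvPC g1 g2 p ∧ ∀ j : Nat, j < p.length → pvEI g1 j p.length = pvEI g2 (p.getD j 0) t) := by
  constructor
  · intro h
    refine ⟨pvPC_append_left _ _ _ _ h, fun j hj => ?_⟩
    have := h j p.length hj (by simp)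
    rwa [List.getD_append _ _ _ _ hj, List.getD_append_right _ _ _ _ (le_refl _), Nat.sub_self] at this
  · rintro ⟨hpc, hnew⟩ a b hab hb
    simp only [List.length_append, List.length_singleton] at hb
    rcases Nat.lt_or_ge b p.length with hb' | hb'
    · rw [List.getD_append _ _ _ _ (by omega), List.getD_append _ _ _ _ hb']
      exact hpc a b hab hb'
    · have hbe : b = p.length := by omega
      subst hbe
      rw [List.getD_append _ _ _ _ (by omega), List.getD_append_right _ _ _ _ (le_refl _), Nat.sub_self]
      exact hnew a (by omega)

-- the backtracking invariant
theorem pvExtend_iff (g1 g2 : List (List Int)) (k : Int) :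
    ∀ (fuel : Nat) (p : List Int), p.length + fuel = g1.length →
      p.Nodup → pvBlk k (g1.length : Int) p → pvPC g1 g2 p →
      (pvExtend g1 g2 (g1.length : Int) k fuel p = true ↔ ∃ s, pvGood g1 g2 k (p ++ s)) := by
  intro fuel
  induction fuel with
  | zero =>
    intro p hlen hnd hblk hpc
    rw [pvExtend]
    rw [if_pos (by simpa [beq_iff_eq] using congrArg (Nat.cast : Nat → Int) (by omega : p.length = g1.length))]
    constructor
    · intro _
      exact ⟨[], by rw [List.append_nil]; exact ⟨by omega, hnd, hblk, hpc⟩⟩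
    · intro _
      rfl
  | succ fuel ih =>
    intro p hlen hnd hblk hpc
    have hplt : p.length < g1.length := by omega
    rw [pvExtend]
    rw [if_neg (by simp only [beq_iff_eq]; intro hc; exact absurd (by exact_mod_cast hc) (by omega))]
    rw [List.any_eq_true]
    constructor
    · rintro ⟨t, htmem, hcond⟩
      simp only [Bool.and_eq_true, Bool.not_eq_true'] at hcond
      obtain ⟨⟨hcont, hall⟩, hext⟩ := hcond
      have htnm : t ∉ p := by simpa using hcont
      have hnew : ∀ j : Nat, j < p.length → pvEI g1 j p.length = pvEI g2 (p.getD j 0) t := by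
        intro j hj
        have := List.all_eq_true.mp hall (j : Int)
          (by rw [PySem.List.mem_pyRange_one]; exact ⟨by positivity, by exact_mod_cast hj⟩)
        simpa [pvEI, PySem.List.pyGetD_natCast, beq_iff_eq] using this
      have htblk : if (p.length : Int) < k then 0 ≤ t ∧ t < k
          else k ≤ t ∧ t < (g1.length : Int) := by
        rw [PySem.List.mem_pyRange_one] at htmem
        split_ifs at htmem ⊢ with h
        · exact htmem
        · exact htmem
      have hnd' : (p ++ [t]).Nodup := by
        rw [List.nodup_append]
        refine ⟨hnd, List.nodup_singleton t, ?_⟩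
        intro a ha b hb
        simp only [List.mem_singleton] at hb
        subst hb
        exact fun h => htnm (h ▸ ha)
      have hblk' : pvBlk k (g1.length : Int) (p ++ [t]) := by
        intro a ha
        simp only [List.length_append, List.length_singleton] at ha
        rcases Nat.lt_or_ge a p.length with ha' | ha'
        · rw [List.getD_append _ _ _ _ ha']; exact hblk a ha'
        · have : a = p.length := by omega
          subst this
          rw [List.getD_append_right _ _ _ _ (le_refl _), Nat.sub_self]
          simpa using htblk
      have hpc' := (pvPC_snoc g1 g2 p t).mpr ⟨hpc, hnew⟩
      obtain ⟨s', hgood⟩ := (ih (p ++ [t]) (by simp; omega) hnd' hblk' hpc').mp hext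
      have heq : (p ++ [t]) ++ s' = p ++ t :: s' := by simp
      exact ⟨t :: s', by rwa [heq] at hgood⟩
    · rintro ⟨s, hgood⟩
      obtain ⟨hglen, hgnd, hgblk, hgpc⟩ := hgood
      cases s with
      | nil => rw [List.append_nil] at hglen; omega
      | cons t s' =>
        have heq : p ++ t :: s' = (p ++ [t]) ++ s' := by simp
        have htval : (p ++ t :: s').getD p.length 0 = t := by
          rw [List.getD_append_right _ _ _ _ (le_refl _), Nat.sub_self]; rfl
        have htblk := hgblk p.length (by simp)
        rw [htval] at htblk
        have hnd2 := List.nodup_append.mp hgnd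
        have htnm : t ∉ p := fun hm => hnd2.2.2 t hm t (by simp) rfl
        have hnd' : (p ++ [t]).Nodup := (List.nodup_append.mp (heq ▸ hgnd)).1
        have hblk' := pvBlk_append_left k (g1.length : Int) (p ++ [t]) s' (heq ▸ hgblk)
        have hpc' := pvPC_append_left g1 g2 (p ++ [t]) s' (heq ▸ hgpc)
        have hsplit := (pvPC_snoc g1 g2 p t).mp hpc'
        refine ⟨t, ?_, ?_⟩
        · rw [PySem.List.mem_pyRange_one]
          split_ifs at htblk ⊢ with h
          · exact htblk
          · exact htblk
        · simp only [Bool.and_eq_true, Bool.not_eq_true']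
          refine ⟨⟨by simpa using htnm, ?_⟩, ?_⟩
          · rw [List.all_eq_true]
            intro x hx
            rw [PySem.List.mem_pyRange_one] at hx
            obtain ⟨j, rfl⟩ : ∃ j : Nat, x = (j : Int) := ⟨x.toNat, by omega⟩
            have := hsplit.2 j (by omega)
            simpa [pvEI, PySem.List.pyGetD_natCast, beq_iff_eq] using this
          · refine (ih (p ++ [t]) (by simp; omega) hnd' hblk' hpc').mpr ⟨s', ?_⟩
            rw [← heq]
            exact ⟨hglen, hgnd, hgblk, hgpc⟩

theorem good_iff_perm_pair (g1 g2 : List (List Int)) (k : Int)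
    (hk0 : 0 ≤ k) (hkn : k ≤ (g1.length : Int)) (q : List Int) :
    pvGood g1 g2 k q ↔
      ∃ p1 p2, p1.Perm (PySem.List.pyRange 0 k 1) ∧ p2.Perm (PySem.List.pyRange k (g1.length : Int) 1) ∧
        q = p1 ++ p2 ∧ pvPC g1 g2 q := by
  constructor
  · rintro ⟨hlen, hnd, hblk, hpc⟩
    refine ⟨q.take k.toNat, q.drop k.toNat, ?_, ?_, (List.take_append_drop _ _).symm, hpc⟩
    · have hl : (q.take k.toNat).length = k.toNat := by simp; omega
      refine List.Subperm.perm_of_length_le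
        (List.subperm_of_subset ((List.take_sublist _ _).nodup hnd) ?_) ?_
      · intro x hx
        obtain ⟨i, hi, rfl⟩ := List.getElem_of_mem hx
        have hi' : i < k.toNat := by simpa [hl] using hi
        rw [List.getElem_take]
        have := hblk i (by omega)
        rw [if_pos (by omega)] at this
        rw [PySem.List.mem_pyRange_one]
        rw [List.getD_eq_getElem _ _ (by omega : i < q.length)] at this
        exact ⟨this.1, this.2⟩
      · rw [hl, PySem.List.length_pyRange_one]; omega
    · have hl : (q.drop k.toNat).length = q.length - k.toNat := by simp
      refine List.Subperm.perm_of_length_le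
        (List.subperm_of_subset ((List.drop_sublist _ _).nodup hnd) ?_) ?_
      · intro x hx
        obtain ⟨i, hi, rfl⟩ := List.getElem_of_mem hx
        rw [List.getElem_drop]
        have hilt : k.toNat + i < q.length := by simp [hl] at hi; omega
        have := hblk (k.toNat + i) hilt
        rw [if_neg (by omega)] at this
        rw [PySem.List.mem_pyRange_one]
        rw [List.getD_eq_getElem _ _ hilt] at this
        exact this
      · rw [hl, PySem.List.length_pyRange_one]; omega
  · rintro ⟨p1, p2, h1, h2, rfl, hpc⟩
    have hl1 : p1.length = k.toNat := by
      rw [h1.length_eq, PySem.List.length_pyRange_one]; omega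
    have hl2 : p2.length = g1.length - k.toNat := by
      rw [h2.length_eq, PySem.List.length_pyRange_one]; omega
    refine ⟨by simp [hl1, hl2]; omega, ?_, ?_, hpc⟩
    · refine List.Nodup.append (h1.nodup_iff.mpr (PySem.List.nodup_pyRange_one _ _))
        (h2.nodup_iff.mpr (PySem.List.nodup_pyRange_one _ _)) ?_
      intro x hx1 hx2
      have b1 := (PySem.List.mem_pyRange_one).mp (h1.mem_iff.mp hx1)
      have b2 := (PySem.List.mem_pyRange_one).mp (h2.mem_iff.mp hx2)
      omega
    · intro a ha
      simp only [List.length_append] at ha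
      rcases Nat.lt_or_ge a p1.length with ha' | ha'
      · rw [List.getD_append _ _ _ _ ha', if_pos (by omega), List.getD_eq_getElem _ _ ha']
        exact (PySem.List.mem_pyRange_one).mp (h1.mem_iff.mp (List.getElem_mem ha'))
      · rw [List.getD_append_right _ _ _ _ ha',
          List.getD_eq_getElem _ _ (by omega : a - p1.length < p2.length), if_neg (by omega)]
        exact (PySem.List.mem_pyRange_one).mp (h2.mem_iff.mp (List.getElem_mem _))

-- ===== VERDICT (by name: the statement is the Claim_ definition above) =====
theorem is_isomorhic_spec : Claim_equal_is_isomorhic := by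
  intro g1 g2 k _hdom hpre
  unfold Spec_is_isomorhic
  simp only [is_isomorhic, is_isomorhic_alt]
  rw [pvTrace_eq_pvTraceB g1, pvTrace_eq_pvTraceB g2]
  by_cases htr : pvTraceB g1 = pvTraceB g2
  · rcases hpre with ⟨_, _, hne⟩ | ⟨hl2, hr1, hr2, hk0, hkn⟩
    · exact (hne (by rw [← pvTraceB_eq_pvDiagSum, ← pvTraceB_eq_pvDiagSum, htr])).elim
    simp only [htr, bne_self_eq_false, Bool.false_eq_true, if_false]
    have hB : (pvExtend g1 g2 (g1.length : Int) k g1.length [] = true) ↔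
        ∃ q, pvGood g1 g2 k q := by
      rw [pvExtend_iff g1 g2 k g1.length [] (by simp) List.nodup_nil
        (fun a ha => by simp at ha) (fun a b hab hb => by simp at hb)]
      simp only [List.nil_append]
    have hA : ((PySem.List.permutations (PySem.List.pyRange 0 k 1)
          (PySem.List.pyRange 0 k 1).length).any fun p1 =>
        (PySem.List.permutations (PySem.List.pyRange k (g1.length : Int) 1)
            (PySem.List.pyRange k (g1.length : Int) 1).length).any fun p2 =>
          pvIsIdentical g1 g2 (p1 ++ p2)) = true ↔ ∃ q, pvGood g1 g2 k q := by
      simp only [List.any_eq_true]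
      constructor
      · rintro ⟨p1, hm1, p2, hm2, hid⟩
        have h1 := PySem.List.perm_of_mem_permutations hm1
        have h2 := PySem.List.perm_of_mem_permutations hm2
        have hlen : (p1 ++ p2).length = g1.length := by
          simp [h1.length_eq, h2.length_eq, PySem.List.length_pyRange_one]; omega
        exact ⟨p1 ++ p2, (good_iff_perm_pair g1 g2 k hk0 hkn _).mpr
          ⟨p1, p2, h1, h2, rfl, (pvIsIdentical_iff_pvPC g1 g2 _ hlen).mp hid⟩⟩
      · rintro ⟨q, hq⟩
        have hqlen := hq.1
        obtain ⟨p1, p2, h1, h2, rfl, hpcq⟩ := (good_iff_perm_pair g1 g2 k hk0 hkn q).mp hq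
        exact ⟨p1, mem_permutations_of_perm p1 _ h1, p2, mem_permutations_of_perm p2 _ h2,
          (pvIsIdentical_iff_pvPC g1 g2 _ hqlen).mpr hpcq⟩
    exact Bool.eq_iff_iff.mpr ⟨fun h => hB.mpr (hA.mp h), fun h => hA.mpr (hB.mp h)⟩
  · simp [bne_iff_ne, htr]
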